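-- pv_equiv track=rewrite | github.com/ccctw-ma/leetcode | src/Match/match269-300/297.py | distinctNames
-- ===== SOURCE A (Python) =====
-- from typing import List
--
-- def distinctNames(ideas: List[str]) -> int:
--     ss = [set() for _ in range(26)]
--     for x in ideas:
--         ss[ord(x[0]) - ord('a')].add(x[1:])
--     res = 0
--     for i in range(26):
--         for j in range(i + 1, 26):
--             res += len(ss[i] - ss[j]) * len(ss[j] - ss[i])
--     return res * 2
-- ===== SOURCE B (Python) =====
-- from typing import List
--
-- def distinctNames(ideas: List[str]) -> int:
--     letters = {}                      # suffix -> set of first letters it occurs with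
--     for x in ideas:
--         letters.setdefault(x[1:], set()).add(x[0])
--     size = {}                         # letter -> number of distinct suffixes
--     common = {}                       # (c, d) with c < d -> suffixes shared by c and d
--     for group in letters.values():
--         sl = sorted(group)
--         for a, ca in enumerate(sl):
--             size[ca] = size.get(ca, 0) + 1
--             for cb in sl[a + 1:]:
--                 common[(ca, cb)] = common.get((ca, cb), 0) + 1
--     res = 0
--     for i in range(26):
--         ci = chr(97 + i)
--         si = size.get(ci, 0)
--         for j in range(i + 1, 26):
--             cj = chr(97 + j)
--             c = common.get((ci, cj), 0)
--             res += (si - c) * (size.get(cj, 0) - c)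
--     return res * 2
-- ===== Notes on version B (the rewrite author's own statement) =====
-- stated objective: alternative
-- what changed: Replaces the 26 per-letter suffix sets and the 26x26 pairwise set-difference scan by an inverted suffix-to-letter-set index from which per-letter distinct-suffix sizes and pairwise shared-suffix counters are accumulated once, each pair term then being computed arithmetically as (size_i-common_ij)*(size_j-common_ij).
-- outside the precondition, e.g. on distinctNames(['Gx', 'ay', 'bz']): A returns 4, B returns 2; on distinctNames(['3a']): A raises IndexError, B returns 0
import Mathlib
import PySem

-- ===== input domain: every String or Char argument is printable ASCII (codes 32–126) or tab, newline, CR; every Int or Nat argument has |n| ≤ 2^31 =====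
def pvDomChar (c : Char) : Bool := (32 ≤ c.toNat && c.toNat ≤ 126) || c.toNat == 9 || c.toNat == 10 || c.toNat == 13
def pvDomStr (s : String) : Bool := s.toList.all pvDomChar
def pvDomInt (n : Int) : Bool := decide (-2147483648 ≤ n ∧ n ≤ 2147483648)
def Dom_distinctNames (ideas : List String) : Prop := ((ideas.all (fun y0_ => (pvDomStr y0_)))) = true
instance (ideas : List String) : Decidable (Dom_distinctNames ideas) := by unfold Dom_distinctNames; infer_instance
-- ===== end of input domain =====

-- B replaces the 26 per-letter suffix sets and the 26x26 set-difference scan of A by an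
-- inverted suffix -> letter-set index with per-letter size and pairwise shared-suffix
-- counters; each pair term becomes (size_i - common_ij) * (size_j - common_ij).


-- ===== PORT A =====
-- literal port of A; strings handled on their code-point lists (PySem.Chars side).
-- 'x[0]' is PySem.List.pyGetD x.toList 0 'a' (Pre_ guarantees x nonempty, so the default
-- is never read); 'ord(x[0]) - ord(''a'')' is (c.toNat : Int) - 97; the possibly negative
-- bucket index goes through PySem.List.pySetD / pyGetD (Python list-index semantics).
def distinctNames (ideas : List String) : Int :=
  let ss : List (PySem.Set (List Char)) :=
    ideas.foldl (fun ss x =>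
      let c : Char := PySem.List.pyGetD x.toList 0 'a'
      let idx : Int := (c.toNat : Int) - 97
      PySem.List.pySetD ss idx
        (PySem.Set.add (PySem.List.pyGetD ss idx PySem.Set.empty)
          (PySem.List.slice x.toList (some 1) none)))
      ((PySem.List.pyRange 0 26 1).map (fun _ => PySem.Set.empty))
  let res : Int :=
    (PySem.List.pyRange 0 26 1).foldl (fun res i =>
      (PySem.List.pyRange (i + 1) 26 1).foldl (fun res j =>
        res +
          (PySem.Set.len (PySem.Set.diff (PySem.List.pyGetD ss i PySem.Set.empty)
              (PySem.List.pyGetD ss j PySem.Set.empty)) : Int) *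
          (PySem.Set.len (PySem.Set.diff (PySem.List.pyGetD ss j PySem.Set.empty)
              (PySem.List.pyGetD ss i PySem.Set.empty)) : Int)) res) 0
  res * 2

-- ===== PORT B =====
-- literal port of Source B; the one-character strings x[0] / chr(97+i) are carried as Char
-- (identical ordering and equality on single characters).
def distinctNames_alt (ideas : List String) : Int :=
  let letters : PySem.Dict (List Char) (PySem.Set Char) :=
    ideas.foldl (fun d x =>
      PySem.Dict.modify d (PySem.List.slice x.toList (some 1) none) PySem.Set.empty
        (fun s => PySem.Set.add s (PySem.List.pyGetD x.toList 0 'a'))) PySem.Dict.empty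
  let sc : PySem.Dict Char Int × PySem.Dict (Char × Char) Int :=
    (PySem.Dict.values letters).foldl (fun sc group =>
      let sl := PySem.List.sorted group (fun c => c) false
      (PySem.List.enumerate sl 0).foldl (fun sc p =>
        let ca := p.2
        let size := PySem.Dict.modify sc.1 ca 0 (· + 1)
        let common := (PySem.List.slice sl (some (p.1 + 1)) none).foldl
          (fun cm cb => PySem.Dict.modify cm (ca, cb) 0 (· + 1)) sc.2
        (size, common)) sc)
      (PySem.Dict.empty, PySem.Dict.empty)
  let res : Int :=
    (PySem.List.pyRange 0 26 1).foldl (fun res i =>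
      let ci : Char := Char.ofNat (97 + i).toNat
      let si : Int := PySem.Dict.getD sc.1 ci 0
      (PySem.List.pyRange (i + 1) 26 1).foldl (fun res j =>
        let cj : Char := Char.ofNat (97 + j).toNat
        let c : Int := PySem.Dict.getD sc.2 (ci, cj) 0
        res + (si - c) * (PySem.Dict.getD sc.1 cj 0 - c)) res) 0
  res * 2

-- ===== PRECONDITION & SPEC =====
-- Pre_ restricts to the problem's natural domain: nonempty names whose first letter is
-- lowercase. Outside it A raises IndexError, except when a first letter falls in 'G'..'`',
-- where Python's negative list indexing silently files the name under another letter's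
-- bucket — an artefact B does not reproduce (B counts only lowercase first letters).
def Pre_distinctNames (ideas : List String) : Prop :=
  ∀ x ∈ ideas, x.toList ≠ [] ∧ 'a' ≤ x.toList.headD 'a' ∧ x.toList.headD 'a' ≤ 'z'
instance (ideas : List String) : Decidable (Pre_distinctNames ideas) := by
  unfold Pre_distinctNames; infer_instance

def pvWitness_distinctNames : List String := ["apple", "ant", "ball", "bat"]

def Spec_distinctNames (ideas : List String) (out : Int) : Prop := out = distinctNames_alt ideas
instance (ideas : List String) (out : Int) : Decidable (Spec_distinctNames ideas out) := by unfold Spec_distinctNames; infer_instance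

-- ===== CLAIM (what is proved, stated in full; the proofs are below) =====
def Claim_equal_distinctNames : Prop := ∀ (ideas : List String), Dom_distinctNames ideas → Pre_distinctNames ideas → Spec_distinctNames ideas (distinctNames ideas)

-- ===== LEMMAS AND PROOFS =====

-- abbreviations for the proofs: first letter and suffix of a name
def pvFst (x : String) : Char := x.toList.headD 'a'
def pvSuf (x : String) : List Char := x.toList.drop 1

-- the letter B's final loop writes for index i (= chr(97+i))
def pvChr (i : Int) : Char := Char.ofNat (97 + i).toNat

-- suffixes filed under first letter c (with multiplicity, in order)
def pvSufs (ideas : List String) (c : Char) : List (List Char) :=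
  (ideas.filter (fun x => pvFst x == c)).map pvSuf

-- the distinct suffixes of first letter c, as A's bucket holds them
def pvS (ideas : List String) (c : Char) : PySem.Set (List Char) :=
  PySem.Set.ofList (pvSufs ideas c)

-- first letters occurring with suffix s (with multiplicity, in order)
def pvLts (ideas : List String) (s : List Char) : List Char :=
  (ideas.filter (fun x => pvSuf x == s)).map pvFst

-- the letter set of suffix s, as B's inverted index holds it
def pvGrp (ideas : List String) (s : List Char) : PySem.Set Char :=
  PySem.Set.ofList (pvLts ideas s)

-- the distinct suffixes overall (B's dict keys)
def pvK (ideas : List String) : List (List Char) :=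
  PySem.Set.ofList (ideas.map pvSuf)

-- all ordered pairs (earlier element, later element) of a list
def pvPairs : List Char → List (Char × Char)
  | [] => []
  | c :: cs => cs.map (fun d => (c, d)) ++ pvPairs cs

-- ---------- small character facts ----------

lemma pvChr_toNat (i : Int) (h0 : 0 ≤ i) (h26 : i < 26) : (pvChr i).toNat = (97 + i).toNat := by
  unfold pvChr
  have hv : ((97 + i).toNat).isValidChar := Or.inl (by omega)
  simp [Char.ofNat, hv]

lemma pvChr_lt (i j : Int) (h0 : 0 ≤ i) (hij : i < j) (hj : j < 26) : pvChr i < pvChr j := by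
  rw [Char.lt_def, UInt32.lt_iff_toNat_lt]
  have h1 := pvChr_toNat i h0 (by omega)
  have h2 := pvChr_toNat j (by omega) hj
  show (pvChr i).toNat < (pvChr j).toNat
  omega

lemma pvChr_eq_iff (c : Char) (hc1 : 'a' ≤ c) (hc2 : c ≤ 'z') (i : Int) (h0 : 0 ≤ i) (h26 : i < 26) :
    (pvChr i = c ↔ i = (c.toNat : Int) - 97) := by
  rw [Char.le_def, UInt32.le_iff_toNat_le] at hc1 hc2
  have hc1' : 97 ≤ c.toNat := hc1
  have hc2' : c.toNat ≤ 122 := hc2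
  constructor
  · intro h
    have := pvChr_toNat i h0 h26
    rw [h] at this
    omega
  · intro h
    have hnat : (97 + i).toNat = c.toNat := by omega
    rw [pvChr, hnat, Char.ofNat_toNat]

-- ---------- generic helper lemmas ----------

lemma pvGetD_zero_headD (l : List Char) (d : Char) : PySem.List.pyGetD l 0 d = l.headD d := by
  cases l <;> simp [PySem.List.pyGetD_zero]

lemma pvSlice_one (x : String) : PySem.List.slice x.toList (some 1) none = pvSuf x := by
  rw [PySem.List.slice_from_one, pvSuf, ← List.drop_one]

lemma pvGetD_map_const (l : List Int) (m : Nat) :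
    (l.map (fun _ => (PySem.Set.empty : PySem.Set (List Char)))).getD m PySem.Set.empty
      = PySem.Set.empty := by
  rw [List.getD_eq_getElem?_getD, List.getElem?_map]
  cases l[m]? <;> simp

-- two nodup lists with the same members: countP of the one is the length of the other
lemma pvCountP_eq_length {α : Type} (K L : List α) (p : α → Bool)
    (hK : K.Nodup) (hL : L.Nodup)
    (h1 : ∀ a ∈ L, a ∈ K ∧ p a = true) (h2 : ∀ a ∈ K, p a = true → a ∈ L) :
    K.countP p = L.length := by
  rw [List.countP_eq_length_filter]
  refine List.Perm.length_eq ?_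
  rw [List.perm_ext_iff_of_nodup (hK.filter p) hL]
  intro a
  simp only [List.mem_filter]
  constructor
  · rintro ⟨ha, hp⟩; exact h2 a ha hp
  · intro ha; exact ⟨(h1 a ha).1, (h1 a ha).2⟩

-- a.filter (· ∈ b) and b.filter (· ∈ a) have equal length for nodup a b
lemma pvInterComm (S T : List (List Char)) (hS : S.Nodup) (hT : T.Nodup) :
    (S.filter (fun a => a ∈ T)).length = (T.filter (fun a => a ∈ S)).length := by
  refine List.Perm.length_eq ?_
  rw [List.perm_ext_iff_of_nodup (hS.filter _) (hT.filter _)]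
  intro a
  simp only [List.mem_filter, decide_eq_true_eq]
  tauto

lemma pvCountMapPair (a c d : Char) (t : List Char) :
    (t.map (fun y => (a, y))).count (c, d) = if a = c then t.count d else 0 := by
  induction t with
  | nil => simp
  | cons y t ih =>
    simp only [List.map_cons, List.count_cons, ih]
    by_cases hac : a = c
    · by_cases hyd : y = d
      · simp [hac, hyd]
      · simp [hac, hyd, Prod.ext_iff]
    · simp [hac, Prod.ext_iff]

lemma pvCountPairs (sl : List Char) (h : sl.Pairwise (· < ·)) (c d : Char) :
    (pvPairs sl).count (c, d) = if c ∈ sl ∧ d ∈ sl ∧ c < d then 1 else 0 := by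
  induction sl with
  | nil => simp [pvPairs]
  | cons a t ih =>
    have ha : ∀ y ∈ t, a < y := fun y hy => (List.pairwise_cons.mp h).1 y hy
    have hp : t.Pairwise (· < ·) := (List.pairwise_cons.mp h).2
    have hnd : t.Nodup := hp.imp (fun h => ne_of_lt h)
    have hna : a ∉ t := fun hmem => absurd (ha a hmem) (lt_irrefl a)
    rw [pvPairs, List.count_append, pvCountMapPair, ih hp]
    by_cases hac : a = c
    · subst hac
      rw [if_pos rfl, if_neg (show ¬(a ∈ t ∧ d ∈ t ∧ a < d) from fun hh => hna hh.1)]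
      by_cases hdt : d ∈ t
      · have had : a < d := ha d hdt
        rw [List.count_eq_one_of_mem hnd hdt,
          if_pos ⟨List.mem_cons_self, List.mem_cons_of_mem a hdt, had⟩]
      · rw [List.count_eq_zero.mpr hdt]
        rw [if_neg ?_]
        rintro ⟨-, hd, had⟩
        rcases List.mem_cons.mp hd with hda | hdt'
        · rw [hda] at had; exact absurd had (lt_irrefl a)
        · exact hdt hdt'
    · rw [if_neg hac, Nat.zero_add]
      by_cases hcv : c ∈ t ∧ d ∈ t ∧ c < d
      · rw [if_pos hcv,
          if_pos ⟨List.mem_cons_of_mem a hcv.1, List.mem_cons_of_mem a hcv.2.1, hcv.2.2⟩]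
      · rw [if_neg hcv, if_neg ?_]
        rintro ⟨hc, hd, hcd⟩
        have hct : c ∈ t := by
          rcases List.mem_cons.mp hc with h' | h'
          · exact absurd h'.symm hac
          · exact h'
        have hdt : d ∈ t := by
          rcases List.mem_cons.mp hd with h' | h'
          · rw [h'] at hcd
            exact absurd (lt_trans (ha c hct) hcd) (lt_irrefl a)
          · exact h'
        exact hcv ⟨hct, hdt, hcd⟩

lemma pvCountSorted (g : PySem.Set Char) (hn : g.Nodup) (c : Char) :
    (PySem.List.sorted g (fun c => c) false).count c = if c ∈ g then 1 else 0 := by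
  rw [List.Perm.count_eq (PySem.List.sorted_perm g (fun c => c) false)]
  by_cases hc : c ∈ g
  · rw [List.count_eq_one_of_mem hn hc, if_pos hc]
  · rw [List.count_eq_zero.mpr hc, if_neg hc]

-- ---------- membership characterisations ----------

lemma pvMem_grp (ideas : List String) (s : List Char) (c : Char) :
    c ∈ pvGrp ideas s ↔ ∃ x ∈ ideas, pvSuf x = s ∧ pvFst x = c := by
  rw [pvGrp, PySem.Set.mem_ofList, pvLts, List.mem_map]
  constructor
  · rintro ⟨x, hx, rfl⟩
    rw [List.mem_filter] at hx
    exact ⟨x, hx.1, by simpa using hx.2, rfl⟩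
  · rintro ⟨x, hx, hs, rfl⟩
    exact ⟨x, List.mem_filter.mpr ⟨hx, by simpa using hs⟩, rfl⟩

lemma pvMem_S (ideas : List String) (c : Char) (s : List Char) :
    s ∈ pvS ideas c ↔ ∃ x ∈ ideas, pvFst x = c ∧ pvSuf x = s := by
  rw [pvS, PySem.Set.mem_ofList, pvSufs, List.mem_map]
  constructor
  · rintro ⟨x, hx, rfl⟩
    rw [List.mem_filter] at hx
    exact ⟨x, hx.1, by simpa using hx.2, rfl⟩
  · rintro ⟨x, hx, hc, rfl⟩
    exact ⟨x, List.mem_filter.mpr ⟨hx, by simpa using hc⟩, rfl⟩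

lemma pvMem_K_of_mem_S (ideas : List String) (c : Char) (s : List Char) (h : s ∈ pvS ideas c) :
    s ∈ pvK ideas := by
  rw [pvMem_S] at h
  obtain ⟨x, hx, -, hs⟩ := h
  rw [pvK, PySem.Set.mem_ofList, List.mem_map]
  exact ⟨x, hx, hs⟩

-- size of a letter's distinct-suffix bucket, counted over the distinct suffixes
lemma pvSize_as_countP (ideas : List String) (c : Char) :
    (pvK ideas).countP (fun s => c ∈ pvGrp ideas s) = (pvS ideas c).length := by
  refine pvCountP_eq_length _ _ _ (by rw [pvK]; exact PySem.Set.nodup_ofList _)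
    (by rw [pvS]; exact PySem.Set.nodup_ofList _) ?_ ?_
  · intro s hs
    refine ⟨pvMem_K_of_mem_S ideas c s hs, ?_⟩
    rw [pvMem_S] at hs
    obtain ⟨x, hx, hc, hsuf⟩ := hs
    simp only [decide_eq_true_eq]
    rw [pvMem_grp]
    exact ⟨x, hx, hsuf, hc⟩
  · intro s hs hp
    simp only [decide_eq_true_eq] at hp
    rw [pvMem_grp] at hp
    obtain ⟨x, hx, hsuf, hc⟩ := hp
    rw [pvMem_S]
    exact ⟨x, hx, hc, hsuf⟩

-- shared suffixes of letters c and d, counted over the distinct suffixes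
lemma pvCommon_as_countP (ideas : List String) (c d : Char) :
    (pvK ideas).countP (fun s => decide (c ∈ pvGrp ideas s) && decide (d ∈ pvGrp ideas s))
      = ((pvS ideas c).filter (fun s => s ∈ pvS ideas d)).length := by
  refine pvCountP_eq_length _ _ _ (by rw [pvK]; exact PySem.Set.nodup_ofList _)
    ((by rw [pvS]; exact PySem.Set.nodup_ofList _ : (pvS ideas c).Nodup).filter _) ?_ ?_
  · intro s hs
    rw [List.mem_filter, decide_eq_true_eq] at hs
    obtain ⟨hsc, hsd⟩ := hs
    refine ⟨pvMem_K_of_mem_S ideas c s hsc, ?_⟩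
    rw [pvMem_S] at hsc hsd
    obtain ⟨x, hx, hc, hsuf⟩ := hsc
    obtain ⟨y, hy, hd, hsuf'⟩ := hsd
    simp only [Bool.and_eq_true, decide_eq_true_eq]
    constructor
    · rw [pvMem_grp]; exact ⟨x, hx, hsuf, hc⟩
    · rw [pvMem_grp]; exact ⟨y, hy, hsuf', hd⟩
  · intro s hs hp
    simp only [Bool.and_eq_true, decide_eq_true_eq] at hp
    obtain ⟨hc, hd⟩ := hp
    rw [pvMem_grp] at hc hd
    obtain ⟨x, hx, hsuf, hcx⟩ := hc
    obtain ⟨y, hy, hsuf', hdy⟩ := hd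
    rw [List.mem_filter, decide_eq_true_eq]
    constructor
    · rw [pvMem_S]; exact ⟨x, hx, hcx, hsuf⟩
    · rw [pvMem_S]; exact ⟨y, hy, hdy, hsuf'⟩

-- ---------- A-side characterisation ----------

lemma pvFst_eq (x : String) : PySem.List.pyGetD x.toList 0 'a' = pvFst x :=
  pvGetD_zero_headD x.toList 'a'

lemma pvFst_bounds (c : Char) (h1 : 'a' ≤ c) (h2 : c ≤ 'z') : 97 ≤ c.toNat ∧ c.toNat ≤ 122 := by
  rw [Char.le_def, UInt32.le_iff_toNat_le] at h1 h2
  exact ⟨h1, h2⟩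

lemma pvA_fold (ideas : List String) :
    ∀ (acc : List (PySem.Set (List Char))),
      (∀ x ∈ ideas, 'a' ≤ pvFst x ∧ pvFst x ≤ 'z') → acc.length = 26 →
      ∀ i : Int, 0 ≤ i → i < 26 →
      PySem.List.pyGetD
        (ideas.foldl (fun ss x =>
          PySem.List.pySetD ss ((((pvFst x).toNat : Int)) - 97)
            ((PySem.List.pyGetD ss ((((pvFst x).toNat : Int)) - 97) PySem.Set.empty).add (pvSuf x)))
          acc) i PySem.Set.empty
        = PySem.Set.update (PySem.List.pyGetD acc i PySem.Set.empty) (pvSufs ideas (pvChr i)) := by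
  induction ideas with
  | nil =>
    intro acc H hlen i h0 h26
    simp [pvSufs, PySem.Set.update_nil]
  | cons x xs ih =>
    intro acc H hlen i h0 h26
    obtain ⟨hax, hzx⟩ := H x List.mem_cons_self
    have Hxs : ∀ y ∈ xs, 'a' ≤ pvFst y ∧ pvFst y ≤ 'z' := fun y hy => H y (List.mem_cons_of_mem x hy)
    obtain ⟨hb1, hb2⟩ := pvFst_bounds (pvFst x) hax hzx
    have hidx : (((pvFst x).toNat : Int)) - 97 = (((pvFst x).toNat - 97 : Nat) : Int) := by omega
    have hn : (pvFst x).toNat - 97 < acc.length := by omega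
    rw [List.foldl_cons, hidx,
      ih _ Hxs (by rw [PySem.List.length_pySetD]; exact hlen) i h0 h26]
    have hi' : i = ((i.toNat : Nat) : Int) := by omega
    have hstep := PySem.List.pyGetD_pySetD_natCast acc ((pvFst x).toNat - 97) i.toNat
      ((PySem.List.pyGetD acc ((((pvFst x).toNat - 97 : Nat) : Int)) PySem.Set.empty).add (pvSuf x))
      PySem.Set.empty hn
    rw [← hi'] at hstep
    rw [hstep]
    have hsufs : pvSufs (x :: xs) (pvChr i) =
        if pvFst x = pvChr i then pvSuf x :: pvSufs xs (pvChr i) else pvSufs xs (pvChr i) := by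
      rw [pvSufs, List.filter_cons]
      by_cases hx : pvFst x = pvChr i
      · simp [hx, pvSufs]
      · simp [hx, pvSufs]
    have hcond : i.toNat = (pvFst x).toNat - 97 ↔ pvFst x = pvChr i := by
      rw [eq_comm (b := pvChr i),
        pvChr_eq_iff (pvFst x) hax hzx i h0 h26]
      omega
    by_cases hcase : i.toNat = (pvFst x).toNat - 97
    · rw [if_pos hcase, hsufs, if_pos (hcond.mp hcase)]
      have heq : (((pvFst x).toNat - 97 : Nat) : Int) = i := by omega
      rw [heq, PySem.Set.update_cons]
    · rw [if_neg hcase, hsufs, if_neg (fun hh => hcase (hcond.mpr hh))]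

lemma pvA_bucket (ideas : List String)
    (H : ∀ x ∈ ideas, 'a' ≤ pvFst x ∧ pvFst x ≤ 'z') (i : Int) (h0 : 0 ≤ i) (h26 : i < 26) :
    PySem.List.pyGetD
      (ideas.foldl (fun ss x =>
        PySem.List.pySetD ss ((((pvFst x).toNat : Int)) - 97)
          ((PySem.List.pyGetD ss ((((pvFst x).toNat : Int)) - 97) PySem.Set.empty).add (pvSuf x)))
        ((PySem.List.pyRange 0 26 1).map (fun _ => PySem.Set.empty))) i PySem.Set.empty
      = pvS ideas (pvChr i) := by
  rw [pvA_fold ideas _ H (by simp [PySem.List.length_pyRange_one]) i h0 h26]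
  have hi' : i = ((i.toNat : Nat) : Int) := by omega
  have hinit : PySem.List.pyGetD
      ((PySem.List.pyRange 0 26 1).map (fun _ => (PySem.Set.empty : PySem.Set (List Char)))) i
      PySem.Set.empty = PySem.Set.empty := by
    rw [hi', PySem.List.pyGetD_natCast]
    exact pvGetD_map_const _ _
  rw [hinit]
  exact PySem.Set.update_nil_left _

-- ---------- B-side characterisation ----------

lemma pvB_letters_getD (ideas : List String) :
    ∀ (d : PySem.Dict (List Char) (PySem.Set Char)) (s : List Char),
    (ideas.foldl (fun d x =>
      PySem.Dict.modify d (pvSuf x) PySem.Set.empty (fun st => st.add (pvFst x))) d).getD s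
        PySem.Set.empty
      = PySem.Set.update (d.getD s PySem.Set.empty) (pvLts ideas s) := by
  induction ideas with
  | nil => intro d s; simp [pvLts, PySem.Set.update_nil]
  | cons x xs ih =>
    intro d s
    rw [List.foldl_cons, ih]
    have hlts : pvLts (x :: xs) s =
        if pvSuf x = s then pvFst x :: pvLts xs s else pvLts xs s := by
      rw [pvLts, List.filter_cons]
      by_cases hx : pvSuf x = s
      · simp [hx, pvLts]
      · simp [hx, pvLts]
    rw [PySem.Dict.getD_modify, hlts]
    by_cases hx : s = pvSuf x
    · rw [if_pos hx, if_pos hx.symm, hx, PySem.Set.update_cons]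
    · rw [if_neg hx, if_neg (fun hh => hx hh.symm)]

lemma pvB_values (ideas : List String) :
    (ideas.foldl (fun d x =>
      PySem.Dict.modify d (pvSuf x) PySem.Set.empty (fun st => st.add (pvFst x)))
        PySem.Dict.empty).values
      = (pvK ideas).map (fun s => pvGrp ideas s) := by
  have hkeys : (ideas.foldl (fun d x =>
      PySem.Dict.modify d (pvSuf x) PySem.Set.empty (fun st => st.add (pvFst x)))
        PySem.Dict.empty).keys = pvK ideas := by
    rw [PySem.Dict.keys_foldl_modify_key ideas pvSuf PySem.Set.empty
      (fun d x => fun st => st.add (pvFst x)) PySem.Dict.empty]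
    rw [PySem.Dict.keys_empty]
    exact PySem.Set.update_nil_left _
  have hnodup : (ideas.foldl (fun d x =>
      PySem.Dict.modify d (pvSuf x) PySem.Set.empty (fun st => st.add (pvFst x)))
        PySem.Dict.empty).keys.Nodup := by
    rw [hkeys, pvK]; exact PySem.Set.nodup_ofList _
  rw [PySem.Dict.values_eq_map_keys _ hnodup PySem.Set.empty, hkeys]
  refine List.map_congr_left ?_
  intro s hs
  rw [pvB_letters_getD, PySem.Dict.getD_empty]
  exact PySem.Set.update_nil_left _

lemma pvGroup_loop (sl : List Char) :
    ∀ (t : List Char) (k : Nat), sl.drop k = t →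
    ∀ (size : PySem.Dict Char Int) (common : PySem.Dict (Char × Char) Int),
    List.foldl (fun sc (p : Int × Char) =>
        (PySem.Dict.modify sc.1 p.2 0 (· + 1),
         List.foldl (fun cm cb => PySem.Dict.modify cm (p.2, cb) 0 (· + 1)) sc.2
           (PySem.List.slice sl (some (p.1 + 1)) none)))
      (size, common) (PySem.List.enumerate t (k : Int))
      = (t.foldl (fun d c => PySem.Dict.modify d c 0 (· + 1)) size,
         (pvPairs t).foldl (fun d p => PySem.Dict.modify d p 0 (· + 1)) common) := by
  intro t
  induction t with
  | nil =>
    intro k hk size common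
    simp [PySem.List.enumerate_nil, pvPairs]
  | cons c t' ih =>
    intro k hk size common
    rw [PySem.List.enumerate_cons, List.foldl_cons]
    have hdrop : sl.drop (k + 1) = t' := by
      rw [← List.tail_drop, hk, List.tail_cons]
    have hcast : ((k : Int) + 1) = ((k + 1 : Nat) : Int) := by push_cast; ring
    rw [hcast, PySem.List.slice_from_natCast]
    rw [hdrop]
    rw [ih (k + 1) hdrop]
    rw [pvPairs, List.foldl_append]
    rw [← List.foldl_map (f := fun y => (c, y))
      (g := fun d (p : Char × Char) => PySem.Dict.modify d p 0 (· + 1)) (l := t')]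
    simp

lemma pvSC_split :
    ∀ (vs : List (PySem.Set Char)) (size : PySem.Dict Char Int)
      (common : PySem.Dict (Char × Char) Int),
    List.foldl (fun sc group =>
        List.foldl (fun sc (p : Int × Char) =>
          (PySem.Dict.modify sc.1 p.2 0 (· + 1),
           List.foldl (fun cm cb => PySem.Dict.modify cm (p.2, cb) 0 (· + 1)) sc.2
             (PySem.List.slice (PySem.List.sorted group (fun c => c) false) (some (p.1 + 1)) none)))
          sc (PySem.List.enumerate (PySem.List.sorted group (fun c => c) false) 0))
      (size, common) vs
      = (vs.foldl (fun d group =>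
            (PySem.List.sorted group (fun c => c) false).foldl
              (fun d c => PySem.Dict.modify d c 0 (· + 1)) d) size,
         vs.foldl (fun d group =>
            (pvPairs (PySem.List.sorted group (fun c => c) false)).foldl
              (fun d p => PySem.Dict.modify d p 0 (· + 1)) d) common) := by
  intro vs
  induction vs with
  | nil => intro size common; simp
  | cons g vs ih =>
    intro size common
    rw [List.foldl_cons, List.foldl_cons, List.foldl_cons]
    have h0 : ((0 : Nat) : Int) = (0 : Int) := by norm_num
    have := pvGroup_loop (PySem.List.sorted g (fun c => c) false)
      (PySem.List.sorted g (fun c => c) false) 0 List.drop_zero size common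
    rw [h0] at this
    rw [this, ih]

lemma pvGetD_nested {κ β : Type} [BEq κ] [LawfulBEq κ] (f : β → List κ) :
    ∀ (vs : List β) (d : PySem.Dict κ Int) (k : κ),
    (vs.foldl (fun d L => (f L).foldl (fun d x => PySem.Dict.modify d x 0 (· + 1)) d) d).getD k 0
      = d.getD k 0 + ((vs.map (fun L => (((f L).count k : Nat) : Int))).sum) := by
  intro vs
  induction vs with
  | nil => intro d k; simp
  | cons L vs ih =>
    intro d k
    rw [List.foldl_cons, ih, List.map_cons, List.sum_cons,
      PySem.Dict.getD_foldl_modify_add_one]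
    ring

lemma pvB_size (ideas : List String) (c : Char) :
    ((((pvK ideas).map (fun s => pvGrp ideas s)).foldl (fun sc group =>
        List.foldl (fun sc (p : Int × Char) =>
          (PySem.Dict.modify sc.1 p.2 0 (· + 1),
           List.foldl (fun cm cb => PySem.Dict.modify cm (p.2, cb) 0 (· + 1)) sc.2
             (PySem.List.slice (PySem.List.sorted group (fun c => c) false) (some (p.1 + 1)) none)))
          sc (PySem.List.enumerate (PySem.List.sorted group (fun c => c) false) 0))
      ((PySem.Dict.empty, PySem.Dict.empty) :
        PySem.Dict Char Int × PySem.Dict (Char × Char) Int)).1).getD c 0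
      = (((pvS ideas c).length : Nat) : Int) := by
  refine Eq.trans (congrArg (fun t => (t.1).getD c 0)
    (pvSC_split ((pvK ideas).map (fun s => pvGrp ideas s)) PySem.Dict.empty PySem.Dict.empty)) ?_
  show (((pvK ideas).map (fun s => pvGrp ideas s)).foldl (fun d group =>
      (PySem.List.sorted group (fun c => c) false).foldl
        (fun d c => PySem.Dict.modify d c 0 (· + 1)) d) PySem.Dict.empty).getD c 0 = _
  rw [pvGetD_nested (f := fun g => PySem.List.sorted g (fun c => c) false), PySem.Dict.getD_empty,
    List.map_map]
  have hmap : ((pvK ideas).map ((fun L => (((PySem.List.sorted L (fun c => c) false).count c : Nat) : Int)) ∘ (fun s => pvGrp ideas s)))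
      = (pvK ideas).map (fun s => if (fun s => decide (c ∈ pvGrp ideas s)) s = true then (1 : Int) else 0) := by
    refine List.map_congr_left ?_
    intro s hs
    show (((PySem.List.sorted (pvGrp ideas s) (fun c => c) false).count c : Nat) : Int) = _
    rw [pvCountSorted (pvGrp ideas s) (by rw [pvGrp]; exact PySem.Set.nodup_ofList _) c]
    by_cases h : c ∈ pvGrp ideas s
    · simp [h]
    · simp [h]
  rw [hmap, PySem.List.sum_map_ite_one_zero, pvSize_as_countP]
  simp

lemma pvB_common (ideas : List String) (c d : Char) (hcd : c < d) :
    ((((pvK ideas).map (fun s => pvGrp ideas s)).foldl (fun sc group =>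
        List.foldl (fun sc (p : Int × Char) =>
          (PySem.Dict.modify sc.1 p.2 0 (· + 1),
           List.foldl (fun cm cb => PySem.Dict.modify cm (p.2, cb) 0 (· + 1)) sc.2
             (PySem.List.slice (PySem.List.sorted group (fun c => c) false) (some (p.1 + 1)) none)))
          sc (PySem.List.enumerate (PySem.List.sorted group (fun c => c) false) 0))
      ((PySem.Dict.empty, PySem.Dict.empty) :
        PySem.Dict Char Int × PySem.Dict (Char × Char) Int)).2).getD (c, d) 0
      = ((((pvS ideas c).filter (fun s => s ∈ pvS ideas d)).length : Nat) : Int) := by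
  refine Eq.trans (congrArg (fun t => (t.2).getD (c, d) 0)
    (pvSC_split ((pvK ideas).map (fun s => pvGrp ideas s)) PySem.Dict.empty PySem.Dict.empty)) ?_
  show (((pvK ideas).map (fun s => pvGrp ideas s)).foldl (fun dd group =>
      (pvPairs (PySem.List.sorted group (fun c => c) false)).foldl
        (fun dd p => PySem.Dict.modify dd p 0 (· + 1)) dd) PySem.Dict.empty).getD (c, d) 0 = _
  rw [pvGetD_nested (f := fun g => pvPairs (PySem.List.sorted g (fun c => c) false)),
    PySem.Dict.getD_empty, List.map_map]
  have hmap : ((pvK ideas).map ((fun L => (((pvPairs (PySem.List.sorted L (fun c => c) false)).count (c, d) : Nat) : Int)) ∘ (fun s => pvGrp ideas s)))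
      = (pvK ideas).map (fun s =>
          if (fun s => decide (c ∈ pvGrp ideas s) && decide (d ∈ pvGrp ideas s)) s = true
          then (1 : Int) else 0) := by
    refine List.map_congr_left ?_
    intro s hs
    show (((pvPairs (PySem.List.sorted (pvGrp ideas s) (fun c => c) false)).count (c, d) : Nat) : Int) = _
    have hpw : (PySem.List.sorted (pvGrp ideas s) (fun c => c) false).Pairwise (· < ·) := by
      rw [pvGrp]
      exact PySem.List.sorted_ofList_pairwise_lt _
    rw [pvCountPairs _ hpw c d]
    by_cases h1 : c ∈ PySem.List.sorted (pvGrp ideas s) (fun c => c) false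
    · by_cases h2 : d ∈ PySem.List.sorted (pvGrp ideas s) (fun c => c) false
      · rw [if_pos ⟨h1, h2, hcd⟩]
        rw [PySem.List.mem_sorted] at h1 h2
        simp [h1, h2]
      · rw [if_neg (fun hh => h2 hh.2.1)]
        rw [PySem.List.mem_sorted] at h2
        simp [h2]
    · rw [if_neg (fun hh => h1 hh.1)]
      rw [PySem.List.mem_sorted] at h1
      simp [h1]
  rw [hmap, PySem.List.sum_map_ite_one_zero, pvCommon_as_countP]
  simp

-- ---------- the arithmetic bridge: |S - T| = |S| - |S ∩ T| ----------

lemma pvDiff_len (S T : PySem.Set (List Char)) :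
    PySem.Set.len (PySem.Set.diff S T)
      = ((S.length : Nat) : Int) - (((S.filter (fun s => s ∈ T)).length : Nat) : Int) := by
  have h1 : PySem.Set.len (PySem.Set.diff S T)
      = (((S.filter (fun a => !(PySem.Set.contains T a))).length : Nat) : Int) := rfl
  have h2 : (S.filter (fun a => !(PySem.Set.contains T a)))
      = (S.filter (fun a => !(decide (a ∈ T)))) := by
    refine List.filter_congr ?_
    intro a _
    rw [show PySem.Set.contains T a = decide (a ∈ T) from by
      by_cases h : a ∈ T
      · simp [h]
      · simp only [h, decide_false]
        by_contra hc
        exact h ((PySem.Set.contains_iff T a).mp (by revert hc; cases PySem.Set.contains T a <;> simp))]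
  have h3 : S.length = (S.filter (fun s => s ∈ T)).length
      + (S.filter (fun a => !(decide (a ∈ T)))).length := by
    rw [← List.countP_eq_length_filter, ← List.countP_eq_length_filter]
    have := List.length_eq_countP_add_countP (l := S) (fun s => decide (s ∈ T))
    rw [this]
    congr 1
    refine List.countP_congr ?_
    intro a _
    by_cases h : a ∈ T <;> simp [h]
  rw [h1, h2]
  omega

lemma pvTerm (S T : PySem.Set (List Char)) (hS : S.Nodup) (hT : T.Nodup) :
    PySem.Set.len (PySem.Set.diff S T) * PySem.Set.len (PySem.Set.diff T S)
      = (((S.length : Nat) : Int) - (((S.filter (fun s => s ∈ T)).length : Nat) : Int)) *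
        (((T.length : Nat) : Int) - (((S.filter (fun s => s ∈ T)).length : Nat) : Int)) := by
  rw [pvDiff_len S T, pvDiff_len T S]
  have h : (T.filter (fun s => s ∈ S)).length = (S.filter (fun s => s ∈ T)).length :=
    pvInterComm T S hT hS
  rw [h]

lemma pvChr_fold (i : Int) : Char.ofNat (97 + i).toNat = pvChr i := rfl

-- ===== VERDICT (by name: the statement is the Claim_ definition above) =====
set_option maxRecDepth 8192 in
set_option maxHeartbeats 2000000 in
theorem distinctNames_spec : Claim_equal_distinctNames := by
  unfold Claim_equal_distinctNames
  intro ideas hdom hpre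
  unfold Spec_distinctNames
  have H : ∀ x ∈ ideas, 'a' ≤ pvFst x ∧ pvFst x ≤ 'z' :=
    fun x hx => ⟨(hpre x hx).2.1, (hpre x hx).2.2⟩
  simp only [distinctNames, distinctNames_alt, pvFst_eq, pvSlice_one, pvChr_fold]
  rw [pvB_values]
  congr 1
  refine PySem.List.foldl_congr_mem _ _ _ _ ?_
  intro r i hi
  obtain ⟨hi0, hi26⟩ := PySem.List.mem_pyRange_one.mp hi
  refine PySem.List.foldl_congr_mem _ _ _ _ ?_
  intro r' j hj
  obtain ⟨hj1, hj26⟩ := PySem.List.mem_pyRange_one.mp hj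
  rw [pvA_bucket ideas H i hi0 hi26, pvA_bucket ideas H j (by omega) hj26,
    pvB_size ideas (pvChr i), pvB_size ideas (pvChr j),
    pvB_common ideas (pvChr i) (pvChr j) (pvChr_lt i j hi0 (by omega) hj26)]
  rw [pvTerm (pvS ideas (pvChr i)) (pvS ideas (pvChr j))
    (by rw [pvS]; exact PySem.Set.nodup_ofList _)
    (by rw [pvS]; exact PySem.Set.nodup_ofList _)]
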